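-- pv_equiv track=rewrite | github.com/hscspring/The-DataStructure-and-Algorithms | CodingInterview2/67_StringToInt/string_to_int.py | get_sign_num
-- ===== SOURCE A (Python) =====
-- def get_sign_num(s: str) -> int:
--     signs = set(("+", "-"))
--     length = len(s)
--     i, k = 0, 0
--     while i < length and s[i] in signs:
--         if s[i] == "-":
--             k += 1
--         i += 1
--     return i, k
-- ===== SOURCE B (Python) =====
-- def get_sign_num(s: str):
--     stripped = s.lstrip('+-')
--     prefix = s[:len(s) - len(stripped)]
--     return len(prefix), prefix.count('-')
-- ===== Notes on version B (the rewrite author's own statement) =====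
-- stated objective: idiomatic
-- what changed: Replaced the hand-rolled index loop with two fused counters by materializing the leading sign prefix via str.lstrip and deriving its length and minus count from it in separate passes.
import Mathlib
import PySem

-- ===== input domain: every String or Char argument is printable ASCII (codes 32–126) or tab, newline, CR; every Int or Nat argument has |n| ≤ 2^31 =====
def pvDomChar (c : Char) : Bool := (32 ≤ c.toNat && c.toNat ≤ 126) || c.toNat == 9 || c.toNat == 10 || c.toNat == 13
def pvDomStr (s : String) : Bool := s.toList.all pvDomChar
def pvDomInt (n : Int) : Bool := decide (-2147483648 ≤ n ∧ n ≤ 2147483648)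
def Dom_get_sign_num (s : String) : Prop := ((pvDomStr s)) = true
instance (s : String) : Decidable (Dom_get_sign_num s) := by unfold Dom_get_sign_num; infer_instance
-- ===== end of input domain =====

-- B computes the same (i, k) by materializing the sign prefix (lstrip-style) instead of A's fused two-counter index loop; objective: idiomatic.

-- ===== PORT A =====
-- A's while loop over index i, consuming s[i] while it is a sign; structural recursion on the remaining chars.
def get_sign_num_loop : List Char → Int → Int → Int × Int
  | [], i, k => (i, k)
  | c :: cs, i, k =>
    if c == '+' || c == '-' then
      get_sign_num_loop cs (i + 1) (if c == '-' then k + 1 else k)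
    else (i, k)

def get_sign_num (s : String) : Int × Int :=
  get_sign_num_loop s.toList 0 0

-- ===== PORT B =====
-- stripped = s.lstrip('+-') ported as dropWhile on the char list; prefix = s[:len(s)-len(stripped)].
def get_sign_num_alt (s : String) : Int × Int :=
  let stripped := s.toList.dropWhile (fun c => c == '+' || c == '-')
  let pre := s.toList.take (s.toList.length - stripped.length)
  ((pre.length : Int), (pre.count '-' : Int))

-- ===== PRECONDITION & SPEC =====
def Spec_get_sign_num (s : String) (out : Int × Int) : Prop := out = get_sign_num_alt s
instance (s : String) (out : Int × Int) : Decidable (Spec_get_sign_num s out) := by unfold Spec_get_sign_num; infer_instance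

-- ===== CLAIM (what is proved, stated in full; the proofs are below) =====
def Claim_equal_get_sign_num : Prop := ∀ (s : String), Dom_get_sign_num s → Spec_get_sign_num s (get_sign_num s)

-- ===== LEMMAS AND PROOFS =====

theorem get_sign_num_loop_eq (l : List Char) (i k : Int) :
    get_sign_num_loop l i k =
      (i + ((l.takeWhile (fun c => c == '+' || c == '-')).length : Int),
       k + ((l.takeWhile (fun c => c == '+' || c == '-')).count '-' : Int)) := by
  induction l generalizing i k with
  | nil => simp [get_sign_num_loop]
  | cons c cs ih =>
    by_cases h : (c == '+' || c == '-') = true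
    · simp only [get_sign_num_loop, h, if_pos, List.takeWhile_cons, List.length_cons,
        List.count_cons, ih]
      by_cases hm : c = '-'
      · subst hm; simp; constructor <;> ring
      · have : (c == '-') = false := by simp [hm]
        simp [this]; ring
    · simp [get_sign_num_loop, h]

theorem take_eq_takeWhile (l : List Char) (p : Char → Bool) :
    l.take (l.length - (l.dropWhile p).length) = l.takeWhile p := by
  have hlen : (l.takeWhile p).length + (l.dropWhile p).length = l.length := by
    have := List.takeWhile_append_dropWhile (p := p) (l := l)
    calc (l.takeWhile p).length + (l.dropWhile p).length
        = (l.takeWhile p ++ l.dropWhile p).length := (List.length_append).symm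
      _ = l.length := by rw [this]
  have h1 : l.length - (l.dropWhile p).length = (l.takeWhile p).length := by omega
  rw [h1]
  exact (List.prefix_iff_eq_take.mp (List.takeWhile_prefix p)).symm

-- ===== VERDICT (by name: the statement is the Claim_ definition above) =====
theorem get_sign_num_spec : Claim_equal_get_sign_num := by
  intro s _
  unfold Spec_get_sign_num get_sign_num get_sign_num_alt
  simp only [get_sign_num_loop_eq, take_eq_takeWhile]
  simp
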